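-- pv_equiv track=rewrite | github.com/Hemanthgummadapu/divya-high-school-bcm | scripts/generate_paper_pdf.py | order_sections
-- ===== SOURCE A (Python) =====
-- def is_mcq_section(section_name):
--     u = (section_name or "").upper()
--     return "PART-B" in u or "SECTION-A" in u or "OBJECTIVE" in u or "MCQ" in u
--
-- def order_sections(questions_by_section):
--     """PART-B (MCQ) first, then SECTION-I, SECTION-II, SECTION-III, then rest."""
--     part_b = []
--     section_ordered = []
--     rest = []
--     for name in questions_by_section.keys():
--         if is_mcq_section(name):
--             part_b.append(name)
--         elif any(x in name.upper() for x in ("SECTION-I", "SECTION I")):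
--             section_ordered.append((1, name))
--         elif any(x in name.upper() for x in ("SECTION-II", "SECTION II")):
--             section_ordered.append((2, name))
--         elif any(x in name.upper() for x in ("SECTION-III", "SECTION III")):
--             section_ordered.append((3, name))
--         else:
--             rest.append(name)
--     section_ordered.sort(key=lambda t: t[0])
--     order = part_b + [n for _, n in section_ordered] + rest
--     return [s for s in order if s in questions_by_section and questions_by_section[s]]
-- ===== SOURCE B (Python) =====
-- def is_mcq_section(section_name):
--     u = (section_name or "").upper()
--     return "PART-B" in u or "SECTION-A" in u or "OBJECTIVE" in u or "MCQ" in u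
--
-- def _priority(name):
--     if is_mcq_section(name):
--         return 0
--     u = name.upper()
--     if "SECTION-I" in u or "SECTION I" in u:
--         return 1
--     if "SECTION-II" in u or "SECTION II" in u:
--         return 2
--     if "SECTION-III" in u or "SECTION III" in u:
--         return 3
--     return 4
--
-- def order_sections(questions_by_section):
--     """PART-B (MCQ) first, then SECTION-I, SECTION-II, SECTION-III, then rest."""
--     order = sorted(questions_by_section, key=_priority)
--     return [s for s in order if questions_by_section[s]]
-- ===== Notes on version B (the rewrite author's own statement) =====
-- stated objective: simpler
-- what changed: A's three explicit accumulator buckets plus a secondary sort of tagged pairs are replaced by a single stable sort of the dict keys under a 0-4 priority key, followed by the same truthiness filter.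
import Mathlib
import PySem

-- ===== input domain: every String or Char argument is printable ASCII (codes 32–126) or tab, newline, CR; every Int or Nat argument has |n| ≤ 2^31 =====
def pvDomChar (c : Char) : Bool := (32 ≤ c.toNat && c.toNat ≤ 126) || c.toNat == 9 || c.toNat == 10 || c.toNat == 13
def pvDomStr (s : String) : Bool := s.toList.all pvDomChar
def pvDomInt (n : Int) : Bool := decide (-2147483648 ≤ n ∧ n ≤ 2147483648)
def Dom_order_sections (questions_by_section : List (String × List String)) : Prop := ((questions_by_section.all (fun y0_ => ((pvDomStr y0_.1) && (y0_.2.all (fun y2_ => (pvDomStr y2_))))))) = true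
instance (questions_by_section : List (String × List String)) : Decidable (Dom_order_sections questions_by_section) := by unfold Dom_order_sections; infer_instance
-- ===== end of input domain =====

-- B replaces A's three explicit buckets plus a secondary sort by one stable keyed sort over the keys (objective: simpler).

-- ===== PORT A =====
-- helper is_mcq_section from the same module; section_name is always a str here, so `section_name or ""` upper-cases the string itself
def pvIsMcqSection (name : String) : Bool :=
  let u := PySem.Str.upper name
  PySem.Str.isIn "PART-B" u || PySem.Str.isIn "SECTION-A" u || PySem.Str.isIn "OBJECTIVE" u || PySem.Str.isIn "MCQ" u

def order_sections (questions_by_section : List (String × List String)) : List String :=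
  let d := PySem.Dict.ofList questions_by_section
  let acc := d.keys.foldl (fun (acc : List String × List (Int × String) × List String) name =>
      if pvIsMcqSection name then (acc.1 ++ [name], acc.2.1, acc.2.2)
      else if PySem.Str.isIn "SECTION-I" (PySem.Str.upper name) || PySem.Str.isIn "SECTION I" (PySem.Str.upper name) then
        (acc.1, acc.2.1 ++ [((1 : Int), name)], acc.2.2)
      else if PySem.Str.isIn "SECTION-II" (PySem.Str.upper name) || PySem.Str.isIn "SECTION II" (PySem.Str.upper name) then
        (acc.1, acc.2.1 ++ [((2 : Int), name)], acc.2.2)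
      else if PySem.Str.isIn "SECTION-III" (PySem.Str.upper name) || PySem.Str.isIn "SECTION III" (PySem.Str.upper name) then
        (acc.1, acc.2.1 ++ [((3 : Int), name)], acc.2.2)
      else (acc.1, acc.2.1, acc.2.2 ++ [name])) ([], [], [])
  let sortedSec := PySem.List.sorted acc.2.1 (fun t => t.1)
  let order := acc.1 ++ sortedSec.map (fun t => t.2) ++ acc.2.2
  order.filter (fun s => d.contains s && decide (d.getD s [] ≠ []))

-- ===== PORT B =====
def pvPriority (name : String) : Int :=
  if pvIsMcqSection name then 0
  else
    let u := PySem.Str.upper name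
    if PySem.Str.isIn "SECTION-I" u || PySem.Str.isIn "SECTION I" u then 1
    else if PySem.Str.isIn "SECTION-II" u || PySem.Str.isIn "SECTION II" u then 2
    else if PySem.Str.isIn "SECTION-III" u || PySem.Str.isIn "SECTION III" u then 3
    else 4

def order_sections_alt (questions_by_section : List (String × List String)) : List String :=
  let d := PySem.Dict.ofList questions_by_section
  let order := PySem.List.sorted d.keys pvPriority
  order.filter (fun s => decide (d.getD s [] ≠ []))

-- ===== PRECONDITION & SPEC =====
def Spec_order_sections (questions_by_section : List (String × List String)) (out : List String) : Prop := out = order_sections_alt questions_by_section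
instance (questions_by_section : List (String × List String)) (out : List String) : Decidable (Spec_order_sections questions_by_section out) := by unfold Spec_order_sections; infer_instance

-- ===== CLAIM (what is proved, stated in full; the proofs are below) =====
def Claim_equal_order_sections : Prop := ∀ (questions_by_section : List (String × List String)), Dom_order_sections questions_by_section → Spec_order_sections questions_by_section (order_sections questions_by_section)

-- ===== LEMMAS AND PROOFS =====
def pvF (i : Int) (ks : List String) : List String := ks.filter (fun n => pvPriority n == i)

theorem pv_secII_imp_secI (u : String) (h : (PySem.Str.isIn "SECTION-II" u || PySem.Str.isIn "SECTION II" u) = true) :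
    (PySem.Str.isIn "SECTION-I" u || PySem.Str.isIn "SECTION I" u) = true := by
  rcases Bool.or_eq_true_iff.mp h with h' | h'
  · refine Bool.or_eq_true_iff.mpr (Or.inl ?_)
    rw [PySem.Str.isIn_iff_infix] at h' ⊢
    exact ((by decide : "SECTION-I".toList <+: "SECTION-II".toList)).isInfix.trans h' 
  · refine Bool.or_eq_true_iff.mpr (Or.inr ?_)
    rw [PySem.Str.isIn_iff_infix] at h' ⊢
    exact ((by decide : "SECTION I".toList <+: "SECTION II".toList)).isInfix.trans h'

theorem pv_secIII_imp_secI (u : String) (h : (PySem.Str.isIn "SECTION-III" u || PySem.Str.isIn "SECTION III" u) = true) :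
    (PySem.Str.isIn "SECTION-I" u || PySem.Str.isIn "SECTION I" u) = true := by
  rcases Bool.or_eq_true_iff.mp h with h' | h'
  · refine Bool.or_eq_true_iff.mpr (Or.inl ?_)
    rw [PySem.Str.isIn_iff_infix] at h' ⊢
    exact ((by decide : "SECTION-I".toList <+: "SECTION-III".toList)).isInfix.trans h' 
  · refine Bool.or_eq_true_iff.mpr (Or.inr ?_)
    rw [PySem.Str.isIn_iff_infix] at h' ⊢
    exact ((by decide : "SECTION I".toList <+: "SECTION III".toList)).isInfix.trans h'

theorem pv_secCond_false_II (n : String) (h2 : ¬ ((PySem.Str.isIn "SECTION-I" (PySem.Str.upper n) || PySem.Str.isIn "SECTION I" (PySem.Str.upper n)) = true)) :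
    (PySem.Str.isIn "SECTION-II" (PySem.Str.upper n) || PySem.Str.isIn "SECTION II" (PySem.Str.upper n)) = false := by
  cases hc : (PySem.Str.isIn "SECTION-II" (PySem.Str.upper n) || PySem.Str.isIn "SECTION II" (PySem.Str.upper n)) with
  | false => rfl
  | true => exact absurd (pv_secII_imp_secI _ hc) h2

theorem pv_secCond_false_III (n : String) (h2 : ¬ ((PySem.Str.isIn "SECTION-I" (PySem.Str.upper n) || PySem.Str.isIn "SECTION I" (PySem.Str.upper n)) = true)) :
    (PySem.Str.isIn "SECTION-III" (PySem.Str.upper n) || PySem.Str.isIn "SECTION III" (PySem.Str.upper n)) = false := by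
  cases hc : (PySem.Str.isIn "SECTION-III" (PySem.Str.upper n) || PySem.Str.isIn "SECTION III" (PySem.Str.upper n)) with
  | false => rfl
  | true => exact absurd (pv_secIII_imp_secI _ hc) h2

theorem pv_pr_cases (n : String) : pvPriority n = 0 ∨ pvPriority n = 1 ∨ pvPriority n = 4 := by
  by_cases h1 : pvIsMcqSection n = true
  · exact Or.inl (by simp only [pvPriority, h1, ite_true])
  · by_cases h2 : (PySem.Str.isIn "SECTION-I" (PySem.Str.upper n) || PySem.Str.isIn "SECTION I" (PySem.Str.upper n)) = true
    · exact Or.inr (Or.inl (by simp only [pvPriority, h1, h2, Bool.false_eq_true, ite_true, ite_false]))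
    · have hII : ¬ ((PySem.Str.isIn "SECTION-II" (PySem.Str.upper n) || PySem.Str.isIn "SECTION II" (PySem.Str.upper n)) = true) := by
        simp only [pv_secCond_false_II n h2]; exact Bool.false_ne_true
      have hIII : ¬ ((PySem.Str.isIn "SECTION-III" (PySem.Str.upper n) || PySem.Str.isIn "SECTION III" (PySem.Str.upper n)) = true) := by
        simp only [pv_secCond_false_III n h2]; exact Bool.false_ne_true
      exact Or.inr (Or.inr (by simp only [pvPriority, h1, h2, hII, hIII, Bool.false_eq_true, ite_false]))

theorem pv_insertBy_append_left {α : Type} (before : α → α → Bool) (x : α) (l1 l2 : List α)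
    (h : ∀ y ∈ l1, before x y = false) :
    PySem.List.insertBy before x (l1 ++ l2) = l1 ++ PySem.List.insertBy before x l2 := by
  induction l1 with
  | nil => simp
  | cons a t ih =>
    simp only [List.cons_append, PySem.List.insertBy, h a (by simp), Bool.false_eq_true, if_false]
    rw [ih (fun y hy => h y (by simp [hy]))]

theorem pv_insertBy_all_before {α : Type} (before : α → α → Bool) (x : α) (l : List α)
    (h : ∀ y ∈ l, before x y = true) :
    PySem.List.insertBy before x l = x :: l := by
  cases l with
  | nil => simp [PySem.List.insertBy]
  | cons a t => simp [PySem.List.insertBy, h a (by simp)]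

theorem pv_mem_pvF {i : Int} {ks : List String} {y : String} (h : y ∈ pvF i ks) : pvPriority y = i := by
  have h' : y ∈ ks.filter (fun n => pvPriority n == i) := by simpa [pvF] using h
  exact beq_iff_eq.mp (List.mem_filter.mp h').2

theorem pv_bucketSort (ks : List String) :
    PySem.List.sorted ks pvPriority = pvF 0 ks ++ pvF 1 ks ++ pvF 4 ks := by
  rw [PySem.List.sorted_eq_foldl_insertBy]
  induction ks using List.reverseRecOn with
  | nil => simp [pvF]
  | append_singleton t x ih =>
    rw [List.foldl_append, List.foldl_cons, List.foldl_nil, ih]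
    have hF : ∀ i : Int, pvF i (t ++ [x]) = pvF i t ++ (if pvPriority x == i then [x] else []) := by
      intro i; simp [pvF, List.filter_append, List.filter_cons]
    rcases pv_pr_cases x with hp | hp | hp
    · rw [List.append_assoc]
      rw [pv_insertBy_append_left _ _ (pvF 0 t) _
        (fun y hy => by simp [pv_mem_pvF hy, hp])]
      rw [pv_insertBy_all_before _ _ _
        (fun y hy => by
          rcases List.mem_append.mp hy with hy | hy
          · simp [pv_mem_pvF hy, hp]
          · simp [pv_mem_pvF hy, hp])]
      simp [hF, hp]
    · rw [pv_insertBy_append_left _ _ (pvF 0 t ++ pvF 1 t) _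
        (fun y hy => by
          rcases List.mem_append.mp hy with hy | hy
          · simp [pv_mem_pvF hy, hp]
          · simp [pv_mem_pvF hy, hp])]
      rw [pv_insertBy_all_before _ _ _ (fun y hy => by simp [pv_mem_pvF hy, hp])]
      simp [hF, hp]
    · rw [PySem.List.insertBy_of_forall_not_before _ _ _
        (fun y hy => by
          rcases List.mem_append.mp hy with hy | hy
          · rcases List.mem_append.mp hy with hy | hy
            · simp [pv_mem_pvF hy, hp]
            · simp [pv_mem_pvF hy, hp]
          · simp [pv_mem_pvF hy, hp])]
      simp [hF, hp]

theorem pv_foldA (ks : List String) (pb : List String) (so : List (Int × String)) (r : List String) :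
    ks.foldl (fun (acc : List String × List (Int × String) × List String) name =>
      if pvIsMcqSection name then (acc.1 ++ [name], acc.2.1, acc.2.2)
      else if PySem.Str.isIn "SECTION-I" (PySem.Str.upper name) || PySem.Str.isIn "SECTION I" (PySem.Str.upper name) then
        (acc.1, acc.2.1 ++ [((1 : Int), name)], acc.2.2)
      else if PySem.Str.isIn "SECTION-II" (PySem.Str.upper name) || PySem.Str.isIn "SECTION II" (PySem.Str.upper name) then
        (acc.1, acc.2.1 ++ [((2 : Int), name)], acc.2.2)
      else if PySem.Str.isIn "SECTION-III" (PySem.Str.upper name) || PySem.Str.isIn "SECTION III" (PySem.Str.upper name) then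
        (acc.1, acc.2.1 ++ [((3 : Int), name)], acc.2.2)
      else (acc.1, acc.2.1, acc.2.2 ++ [name])) (pb, so, r)
    = (pb ++ pvF 0 ks, so ++ (pvF 1 ks).map (fun n => ((1 : Int), n)), r ++ pvF 4 ks) := by
  induction ks generalizing pb so r with
  | nil => simp [pvF]
  | cons x t ih =>
    simp only [List.foldl_cons]
    by_cases h1 : pvIsMcqSection x = true
    · rw [if_pos h1, ih]
      have hp : pvPriority x = 0 := by simp only [pvPriority, h1, ite_true]
      simp [pvF, hp]
    · rw [if_neg h1]
      by_cases h2 : (PySem.Str.isIn "SECTION-I" (PySem.Str.upper x) || PySem.Str.isIn "SECTION I" (PySem.Str.upper x)) = true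
      · rw [if_pos h2, ih]
        have hp : pvPriority x = 1 := by
          simp only [pvPriority, h1, h2, Bool.false_eq_true, ite_true, ite_false]
        simp [pvF, hp]
      · have hII : ¬ ((PySem.Str.isIn "SECTION-II" (PySem.Str.upper x) || PySem.Str.isIn "SECTION II" (PySem.Str.upper x)) = true) := by
          simp only [pv_secCond_false_II x h2]; exact Bool.false_ne_true
        have hIII : ¬ ((PySem.Str.isIn "SECTION-III" (PySem.Str.upper x) || PySem.Str.isIn "SECTION III" (PySem.Str.upper x)) = true) := by
          simp only [pv_secCond_false_III x h2]; exact Bool.false_ne_true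
        rw [if_neg h2, if_neg hII, if_neg hIII, ih]
        have hp : pvPriority x = 4 := by
          simp only [pvPriority, h1, h2, hII, hIII, Bool.false_eq_true, ite_false]
        simp [pvF, hp]

theorem pv_main (q : List (String × List String)) : order_sections q = order_sections_alt q := by
  simp only [order_sections, order_sections_alt]
  rw [pv_foldA, pv_bucketSort]
  rw [PySem.List.sorted_eq_self_of_pairwise _ _ (by
    simp only [List.nil_append, List.pairwise_map]
    exact List.pairwise_of_forall (fun _ _ => le_refl 1))]
  simp only [List.nil_append, List.map_map]
  have hmap : List.map ((fun (t : Int × String) => t.2) ∘ fun n => ((1 : Int), n)) (pvF 1 (PySem.Dict.ofList q).keys)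
      = pvF 1 (PySem.Dict.ofList q).keys := by simp
  rw [hmap]
  apply List.filter_congr
  intro s hs
  have hks : s ∈ (PySem.Dict.ofList q).keys := by
    rcases List.mem_append.mp hs with h | h
    · rcases List.mem_append.mp h with h | h <;> exact List.mem_of_mem_filter h
    · exact List.mem_of_mem_filter h
  have hc : (PySem.Dict.ofList q).contains s = true := (PySem.Dict.contains_iff_mem_keys _ s).mpr hks
  simp [hc]

-- ===== VERDICT (by name: the statement is the Claim_ definition above) =====
theorem order_sections_spec : Claim_equal_order_sections := by
  intro q _
  exact pv_main q
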